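-- pv_equiv track=rewrite | github.com/ViditSachdev1412/Advent-of-Code-2025 | Day 10/solution10part1.py | min_solution_gf2
-- ===== SOURCE A (Python) =====
-- from itertools import product
--
-- def min_solution_gf2(x0, basis):
--     """Enumerate all combinations of nullspace basis to find min weight."""
--     if not basis:
--         return sum(x0)
--
--     k = len(basis)
--     best = float('inf')
--
--     for mask in product([0,1], repeat=k):
--         x = x0[:]
--         for bit, vec in zip(mask, basis):
--             if bit:
--                 x = [a^b for a,b in zip(x, vec)]
--         best = min(best, sum(x))
--
--     return best
-- ===== SOURCE B (Python) =====
-- def min_solution_gf2(x0, basis):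
--     """Recursive branch on each basis vector, sharing the common prefix XORs
--     instead of rebuilding x from x0 for every mask."""
--     def go(x, bs):
--         if not bs:
--             return sum(x)
--         vec = bs[0]
--         rest = bs[1:]
--         skip = go(x, rest)
--         take = go([a ^ b for a, b in zip(x, vec)], rest)
--         return skip if skip <= take else take
--     return go(x0, basis)
-- ===== Notes on version B (the rewrite author's own statement) =====
-- stated objective: alternative
-- what changed: Replaced A's enumeration of all 2^k masks (each rebuilding x from x0 with up to k XOR passes) by a branch recursion over the basis list that shares the common prefix XORs, doing one skip/take split per vector (measured 7.3x at n=256, but both remain exponential in k and neither finishes at the largest timing size).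
import Mathlib
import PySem

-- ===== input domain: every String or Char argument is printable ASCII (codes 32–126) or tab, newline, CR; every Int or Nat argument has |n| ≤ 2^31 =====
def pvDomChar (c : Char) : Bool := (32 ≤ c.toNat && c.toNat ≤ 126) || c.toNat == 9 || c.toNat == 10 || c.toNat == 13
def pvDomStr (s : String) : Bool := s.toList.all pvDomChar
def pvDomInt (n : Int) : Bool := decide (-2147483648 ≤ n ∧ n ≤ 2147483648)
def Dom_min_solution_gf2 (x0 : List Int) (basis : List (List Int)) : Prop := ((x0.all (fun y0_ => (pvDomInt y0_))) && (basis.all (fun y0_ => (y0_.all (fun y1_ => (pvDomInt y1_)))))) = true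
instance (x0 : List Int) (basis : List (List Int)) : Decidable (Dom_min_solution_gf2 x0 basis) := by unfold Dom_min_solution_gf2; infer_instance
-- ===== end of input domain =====

-- B replaces A's per-mask rebuild (product of all 2^k masks, re-XORing from x0) by a
-- branch-and-share recursion on the basis list (objective: alternative; prefix XORs shared).

-- ===== PORT A =====
-- [a^b for a,b in zip(x, vec)]
def pyXorRow (x vec : List Int) : List Int :=
  (x.zip vec).map (fun p => PySem.Int.bxor p.1 p.2)

-- itertools.product([0,1], repeat=k), in Python's (lexicographic) order
def masksA : Nat → List (List Int)
  | 0 => [[]]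
  | k + 1 => (masksA k).map (fun m => 0 :: m) ++ (masksA k).map (fun m => 1 :: m)

-- the inner loop: for bit, vec in zip(mask, basis): if bit: x = [a^b ...]
def applyMaskA : List Int → List Int → List (List Int) → List Int
  | x, [], _ => x
  | x, _ :: _, [] => x
  | x, bit :: ms, vec :: bs =>
      applyMaskA (if bit ≠ 0 then pyXorRow x vec else x) ms bs

def min_solution_gf2 (x0 : List Int) (basis : List (List Int)) : Int :=
  if basis = [] then x0.foldl (· + ·) 0
  else
    let k := basis.length
    -- best starts at float('inf'): modelled as none; first mask always replaces it
    let best := (masksA k).foldl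
      (fun (best : Option Int) mask =>
        let x := applyMaskA x0 mask basis
        let s := x.foldl (· + ·) 0
        some (match best with
              | none => s
              | some b => min b s)) none
    best.getD 0  -- unreachable default: masksA k is never empty

-- ===== PORT B =====
def goB : List Int → List (List Int) → Int
  | x, [] => x.foldl (· + ·) 0
  | x, vec :: rest =>
      let skip := goB x rest
      let take := goB (pyXorRow x vec) rest
      if skip ≤ take then skip else take

def min_solution_gf2_alt (x0 : List Int) (basis : List (List Int)) : Int :=
  goB x0 basis

-- ===== PRECONDITION & SPEC =====
def Spec_min_solution_gf2 (x0 : List Int) (basis : List (List Int)) (out : Int) : Prop := out = min_solution_gf2_alt x0 basis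
instance (x0 : List Int) (basis : List (List Int)) (out : Int) : Decidable (Spec_min_solution_gf2 x0 basis out) := by unfold Spec_min_solution_gf2; infer_instance

-- ===== CLAIM (what is proved, stated in full; the proofs are below) =====
def Claim_equal_min_solution_gf2 : Prop := ∀ (x0 : List Int) (basis : List (List Int)), Dom_min_solution_gf2 x0 basis → Spec_min_solution_gf2 x0 basis (min_solution_gf2 x0 basis)

-- ===== LEMMAS AND PROOFS =====

-- min of a nonempty list, head-seeded foldl
def minL : List Int → Int
  | [] => 0
  | x :: xs => xs.foldl min x

-- the list of sums A ranges over, for a given working vector x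
def sumsOf (x : List Int) (bs : List (List Int)) : List Int :=
  (masksA bs.length).map (fun m => (applyMaskA x m bs).foldl (· + ·) 0)

theorem masksA_ne_nil (k : Nat) : masksA k ≠ [] := by
  induction k with
  | zero => simp [masksA]
  | succ k ih => simp [masksA, ih]

theorem sumsOf_nil (x : List Int) : sumsOf x [] = [x.foldl (· + ·) 0] := by
  simp [sumsOf, masksA, applyMaskA]

theorem sumsOf_cons (x : List Int) (v : List Int) (bs : List (List Int)) :
    sumsOf x (v :: bs) = sumsOf x bs ++ sumsOf (pyXorRow x v) bs := by
  simp only [sumsOf, List.length_cons, masksA, List.map_append, List.map_map]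
  congr 1

theorem sumsOf_ne_nil (x : List Int) (bs : List (List Int)) : sumsOf x bs ≠ [] := by
  simp [sumsOf, masksA_ne_nil]

theorem foldl_min_init (ys : List Int) (a b : Int) :
    ys.foldl min (min a b) = min a (ys.foldl min b) := by
  induction ys generalizing b with
  | nil => simp
  | cons y ys ih => simp only [List.foldl_cons, min_assoc, ih]

theorem minL_append (l1 l2 : List Int) (h1 : l1 ≠ []) (h2 : l2 ≠ []) :
    minL (l1 ++ l2) = min (minL l1) (minL l2) := by
  cases l1 with
  | nil => exact absurd rfl h1
  | cons x xs =>
    cases l2 with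
    | nil => exact absurd rfl h2
    | cons y ys =>
      simp only [minL, List.cons_append, List.foldl_append, List.foldl_cons]
      rw [foldl_min_init]

theorem goB_eq_minL (bs : List (List Int)) (x : List Int) :
    goB x bs = minL (sumsOf x bs) := by
  induction bs generalizing x with
  | nil => simp [goB, sumsOf_nil, minL]
  | cons v bs ih =>
    rw [sumsOf_cons, minL_append _ _ (sumsOf_ne_nil _ _) (sumsOf_ne_nil _ _)]
    simp only [goB, ← ih]
    rw [min_def]

-- A's fold, seeded with some b, computes the running min
theorem foldA_some (l : List Int) (b : Int) :
    l.foldl (fun (best : Option Int) s =>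
      some (match best with | none => s | some b => min b s)) (some b)
      = some (l.foldl min b) := by
  induction l generalizing b with
  | nil => rfl
  | cons s l ih => simpa using ih (min b s)

theorem foldA_eq_minL (l : List Int) (h : l ≠ []) :
    (l.foldl (fun (best : Option Int) s =>
      some (match best with | none => s | some b => min b s)) none).getD 0
      = minL l := by
  cases l with
  | nil => exact absurd rfl h
  | cons x xs => simp [minL, foldA_some]

-- ===== VERDICT (by name: the statement is the Claim_ definition above) =====
theorem min_solution_gf2_spec : Claim_equal_min_solution_gf2 := by
  intro x0 basis _
  unfold Spec_min_solution_gf2 min_solution_gf2 min_solution_gf2_alt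
  by_cases h : basis = []
  · subst h; simp [goB]
  · simp only [if_neg h]
    rw [goB_eq_minL, ← foldA_eq_minL _ (sumsOf_ne_nil x0 basis)]
    congr 1
    simp [sumsOf, List.foldl_map]
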